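-- pv_equiv track=rewrite | github.com/Nghia03092004/nghia03092004.github.io | project_euler/problem_898/solution.py | list_factorizations
-- ===== SOURCE A (Python) =====
-- def list_factorizations(n, min_f=2, prefix=()):
--     results = []
--     results.append(prefix + (n,))
--     d = min_f
--     while d * d <= n:
--         if n % d == 0:
--             results.extend(list_factorizations(n // d, d, prefix + (d,)))
--         d += 1
--     return results
-- ===== SOURCE B (Python) =====
-- # Explicit-stack (worklist) rewrite of the recursive factorization enumerator:
-- # pop a frame, emit its factorization, push child frames in reverse divisor order
-- # so the ascending preorder of the recursive version is reproduced exactly.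
-- def list_factorizations(n, min_f=2, prefix=()):
--     results = []
--     stack = [(n, min_f, prefix)]
--     while stack:
--         m, f, p = stack.pop()
--         results.append(p + (m,))
--         children = []
--         d = f
--         while d * d <= m:
--             if m % d == 0:
--                 children.append((m // d, d, p + (d,)))
--             d += 1
--         stack.extend(reversed(children))
--     return results
-- ===== Notes on version B (the rewrite author's own statement) =====
-- stated objective: alternative
-- what changed: Replaces A's recursion with an explicit worklist loop: pop a frame, emit its factorization, collect divisor child frames and push them in reverse order, reproducing A's ascending preorder without recursion.
import Mathlib
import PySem

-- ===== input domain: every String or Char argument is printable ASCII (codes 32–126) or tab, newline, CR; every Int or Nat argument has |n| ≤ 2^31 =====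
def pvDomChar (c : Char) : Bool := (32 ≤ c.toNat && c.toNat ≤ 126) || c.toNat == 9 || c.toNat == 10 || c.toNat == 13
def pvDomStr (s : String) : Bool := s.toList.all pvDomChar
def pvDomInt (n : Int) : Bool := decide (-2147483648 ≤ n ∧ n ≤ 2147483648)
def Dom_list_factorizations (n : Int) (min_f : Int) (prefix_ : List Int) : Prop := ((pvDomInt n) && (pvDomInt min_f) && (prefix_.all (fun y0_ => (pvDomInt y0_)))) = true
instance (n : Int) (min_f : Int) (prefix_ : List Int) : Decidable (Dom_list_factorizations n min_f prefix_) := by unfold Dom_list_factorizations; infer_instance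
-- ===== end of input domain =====

-- B replaces A's recursion by an explicit worklist loop (pop a frame, emit its factorization,
-- push child frames in reverse divisor order); equivalence is about the return value.

-- ===== PORT A =====
-- Literal port of A's recursion. The inner while loop (d ascending while d*d ≤ n, extending
-- `results`) is factLoopA, a tail recursion over the accumulator `results`, with a Nat fuel
-- argument as a pure totality guard (the wrapper passes enough: inside the loop d ≤ n, so
-- (n+1-min_f).toNat iterations suffice; the loop stops by itself at d*d > n). The '2 ≤ d'
-- conjunct is a totality guard only: at d = 0 Python raises ZeroDivisionError and at d ≤ 1 the
-- Python call never returns — all outside Pre_list_factorizations.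
def factLoopA (rec : Int → Int → List Int → List (List Int)) : Nat → Int → Int → List Int → List (List Int) → List (List Int)
  | 0, _, _, _, acc => acc
  | fuel + 1, n, d, p, acc =>
    if d * d ≤ n then
      factLoopA rec fuel n (d + 1) p
        (if 2 ≤ d ∧ PySem.Int.mod n d = 0 then acc ++ rec (PySem.Int.floordiv n d) d (p ++ [d]) else acc)
    else acc

-- recursion depth fuel: each recursive call divides n by at least 2, so n.toNat + 1 suffices
def goA : Nat → Int → Int → List Int → List (List Int)
  | 0, n, _, p => [p ++ [n]]
  | depth + 1, n, min_f, p => factLoopA (goA depth) ((n + 1 - min_f).toNat) n min_f p [p ++ [n]]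

def list_factorizations (n : Int) (min_f : Int) (prefix_ : List Int) : List (List Int) :=
  goA (n.toNat + 1) n min_f prefix_

-- ===== PORT B =====
-- Port of B. The Lean list `stack` is the Python stack reversed (head = Python's top), so
-- `stack.pop()` is the head and `stack.extend(reversed(children))` is `children ++ rest`.
-- collectB is B's inner `children`-collecting while loop, a tail recursion over the
-- accumulator `children` (same fuel / `2 ≤ d` totality guards as in port A).
def collectB : Nat → Int → Int → List Int → List (Int × Int × List Int) → List (Int × Int × List Int)
  | 0, _, _, _, acc => acc
  | fuel + 1, m, d, p, acc =>
    if d * d ≤ m then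
      collectB fuel m (d + 1) p
        (if 2 ≤ d ∧ PySem.Int.mod m d = 0 then acc ++ [(PySem.Int.floordiv m d, d, p ++ [d])] else acc)
    else acc

-- fuel bound for the worklist loop (a totality guard only): the number of frames the Python
-- loop ever pops, i.e. the size of the recursion tree, computed by the same guarded loops
def sizeL (rec : Int → Int → Nat) : Nat → Int → Int → Nat → Nat
  | 0, _, _, acc => acc
  | fuel + 1, m, d, acc =>
    if d * d ≤ m then
      sizeL rec fuel m (d + 1)
        (if 2 ≤ d ∧ PySem.Int.mod m d = 0 then acc + rec (PySem.Int.floordiv m d) d else acc)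
    else acc

def sizeT : Nat → Int → Int → Nat
  | 0, _, _ => 1
  | depth + 1, m, f => sizeL (sizeT depth) ((m + 1 - f).toNat) m f 1

-- B's worklist loop: pop a frame, append its factorization to `results` (kept reversed in the
-- accumulator, restored by List.reverse on return), push the frame's children
def runB : Nat → List (Int × Int × List Int) → List (List Int) → List (List Int)
  | _, [], acc => acc.reverse
  | 0, _ :: _, acc => acc.reverse      -- fuel guard, never reached from the wrapper's fuel
  | fuel + 1, (m, f, p) :: rest, acc =>
      runB fuel (collectB ((m + 1 - f).toNat) m f p [] ++ rest) ((p ++ [m]) :: acc)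

def list_factorizations_alt (n : Int) (min_f : Int) (prefix_ : List Int) : List (List Int) :=
  runB (sizeT (n.toNat + 1) n min_f) [(n, min_f, prefix_)] []

-- ===== PRECONDITION & SPEC =====
-- Pre_ excludes exactly the inputs on which the Python A never returns a value: when min_f ≤ 1
-- and min_f² ≤ n the loop reaches d = 0 (ZeroDivisionError) or d = 1 (unbounded recursion), and
-- when min_f ≤ -2 with min_f² ≤ n the top-level loop always reaches d = 0 and raises.
def Pre_list_factorizations (n : Int) (min_f : Int) (prefix_ : List Int) : Prop :=
  2 ≤ min_f ∨ n < min_f * min_f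
instance (n : Int) (min_f : Int) (prefix_ : List Int) : Decidable (Pre_list_factorizations n min_f prefix_) := by unfold Pre_list_factorizations; infer_instance
def pvWitness_list_factorizations : Int × Int × List Int := (12, 2, [])

def Spec_list_factorizations (n : Int) (min_f : Int) (prefix_ : List Int) (out : List (List Int)) : Prop := out = list_factorizations_alt n min_f prefix_
instance (n : Int) (min_f : Int) (prefix_ : List Int) (out : List (List Int)) : Decidable (Spec_list_factorizations n min_f prefix_ out) := by unfold Spec_list_factorizations; infer_instance

-- ===== CLAIM (what is proved, stated in full; the proofs are below) =====
def Claim_equal_list_factorizations : Prop := ∀ (n : Int) (min_f : Int) (prefix_ : List Int), Dom_list_factorizations n min_f prefix_ → Pre_list_factorizations n min_f prefix_ → Spec_list_factorizations n min_f prefix_ (list_factorizations n min_f prefix_)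

-- ===== LEMMAS AND PROOFS =====

lemma pvDivLt (n d : Int) (h : d * d ≤ n) (hd : 2 ≤ d) :
    (PySem.Int.floordiv n d).toNat < n.toNat := by
  have h44 : (2:Int) * 2 ≤ d * d := mul_le_mul hd hd (by omega) (by omega)
  rw [PySem.Int.floordiv_eq_ediv_of_pos (show (0:Int) < d by omega)]
  have h1 : 0 ≤ n / d := Int.ediv_nonneg (by omega) (by omega)
  have h2' : n / d * d ≤ n := Int.ediv_mul_le n (by omega)
  have h5 : n / d * 2 ≤ n / d * d := mul_le_mul_of_nonneg_left hd h1
  have h6 : n / d * 2 ≤ n := h5.trans h2'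
  omega

-- the collecting loop prepends its accumulator
lemma collectB_acc (fuel : Nat) : ∀ (m d : Int) (p : List Int) (acc : List (Int × Int × List Int)),
    collectB fuel m d p acc = acc ++ collectB fuel m d p [] := by
  induction fuel with
  | zero => intro m d p acc; simp [collectB]
  | succ k ih =>
    intro m d p acc
    rw [collectB, collectB]
    by_cases h1 : d * d ≤ m
    · rw [if_pos h1, if_pos h1]
      by_cases hc : 2 ≤ d ∧ PySem.Int.mod m d = 0
      · rw [if_pos hc, if_pos hc,
           ih m (d + 1) p (acc ++ [(PySem.Int.floordiv m d, d, p ++ [d])]),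
           ih m (d + 1) p ([] ++ [(PySem.Int.floordiv m d, d, p ++ [d])])]
        simp
      · rw [if_neg hc, if_neg hc]
        exact ih m (d + 1) p acc
    · rw [if_neg h1, if_neg h1]
      simp

-- the empty-accumulator collecting loop, unfolded one step
lemma collectB_nil_succ (k : Nat) (m d : Int) (p : List Int) :
    collectB (k + 1) m d p []
      = if d * d ≤ m then
          (if 2 ≤ d ∧ PySem.Int.mod m d = 0 then [(PySem.Int.floordiv m d, d, p ++ [d])] else [])
          ++ collectB k m (d + 1) p []
        else [] := by
  rw [collectB]
  by_cases h1 : d * d ≤ m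
  · rw [if_pos h1, if_pos h1]
    by_cases hc : 2 ≤ d ∧ PySem.Int.mod m d = 0
    · rw [if_pos hc, if_pos hc, collectB_acc]
      simp
    · rw [if_neg hc, if_neg hc]
      simp
  · rw [if_neg h1, if_neg h1]

-- every frame the loop collects carries a strictly smaller first component
lemma collectB_mem_lt {fuel : Nat} {m d : Int} {p : List Int} {fr : Int × Int × List Int}
    (hfr : fr ∈ collectB fuel m d p []) : fr.1.toNat < m.toNat := by
  induction fuel generalizing d with
  | zero => simp [collectB] at hfr
  | succ k ih =>
    rw [collectB_nil_succ] at hfr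
    by_cases h1 : d * d ≤ m
    · rw [if_pos h1] at hfr
      rcases List.mem_append.mp hfr with h2 | h2
      · by_cases hc : 2 ≤ d ∧ PySem.Int.mod m d = 0
        · rw [if_pos hc] at h2
          simp only [List.mem_singleton] at h2
          subst h2
          exact pvDivLt m d h1 hc.1
        · rw [if_neg hc] at h2
          simp at h2
      · exact ih h2
    · rw [if_neg h1] at hfr
      simp at hfr

-- A's while loop is its accumulator followed by a flatMap of the recursive calls over B's frames
lemma factLoopA_eq (rec : Int → Int → List Int → List (List Int)) (fuel : Nat) :
    ∀ (n d : Int) (p : List Int) (acc : List (List Int)),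
    factLoopA rec fuel n d p acc
      = acc ++ (collectB fuel n d p []).flatMap (fun fr => rec fr.1 fr.2.1 fr.2.2) := by
  induction fuel with
  | zero => intro n d p acc; simp [factLoopA, collectB]
  | succ k ih =>
    intro n d p acc
    rw [factLoopA, collectB_nil_succ]
    by_cases h1 : d * d ≤ n
    · rw [if_pos h1, if_pos h1]
      by_cases hc : 2 ≤ d ∧ PySem.Int.mod n d = 0
      · rw [if_pos hc, if_pos hc, ih]
        simp
      · rw [if_neg hc, if_neg hc, ih]
        simp
    · rw [if_neg h1, if_neg h1]
      simp

-- the size loop is its accumulator plus the summed recursive sizes over B's frames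
lemma sizeL_eq (rec : Int → Int → Nat) (fuel : Nat) :
    ∀ (m d : Int) (p : List Int) (acc : Nat),
    sizeL rec fuel m d acc
      = acc + ((collectB fuel m d p []).map (fun fr => rec fr.1 fr.2.1)).sum := by
  induction fuel with
  | zero => intro m d p acc; simp [sizeL, collectB]
  | succ k ih =>
    intro m d p acc
    rw [sizeL, collectB_nil_succ]
    by_cases h1 : d * d ≤ m
    · rw [if_pos h1, if_pos h1]
      by_cases hc : 2 ≤ d ∧ PySem.Int.mod m d = 0
      · rw [if_pos hc, if_pos hc, ih _ _ p]
        simp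
        omega
      · rw [if_neg hc, if_neg hc, ih _ _ p]
        simp
    · rw [if_neg h1, if_neg h1]
      simp

-- the depth fuel is irrelevant once it exceeds n.toNat
lemma goA_irrel (N : Nat) : ∀ (n f : Int) (p : List Int) (k k' : Nat),
    n.toNat ≤ N → n.toNat < k → n.toNat < k' → goA k n f p = goA k' n f p := by
  induction N using Nat.strong_induction_on with
  | _ N ih =>
    intro n f p k k' hN hk hk'
    obtain ⟨a, rfl⟩ : ∃ a, k = a + 1 := ⟨k - 1, by omega⟩
    obtain ⟨b, rfl⟩ : ∃ b, k' = b + 1 := ⟨k' - 1, by omega⟩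
    simp only [goA]
    rw [factLoopA_eq, factLoopA_eq]
    congr 1
    refine List.flatMap_congr (fun fr hfr => ?_)
    have hlt := collectB_mem_lt hfr
    exact ih fr.1.toNat (by omega) fr.1 fr.2.1 fr.2.2 a b (le_refl _) (by omega) (by omega)

lemma sizeT_irrel (N : Nat) : ∀ (n f : Int) (k k' : Nat),
    n.toNat ≤ N → n.toNat < k → n.toNat < k' → sizeT k n f = sizeT k' n f := by
  induction N using Nat.strong_induction_on with
  | _ N ih =>
    intro n f k k' hN hk hk'
    obtain ⟨a, rfl⟩ : ∃ a, k = a + 1 := ⟨k - 1, by omega⟩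
    obtain ⟨b, rfl⟩ : ∃ b, k' = b + 1 := ⟨k' - 1, by omega⟩
    simp only [sizeT]
    rw [sizeL_eq _ _ _ _ [], sizeL_eq _ _ _ _ []]
    congr 1
    refine congrArg List.sum (List.map_congr_left (fun fr hfr => ?_))
    have hlt := collectB_mem_lt hfr
    exact ih fr.1.toNat (by omega) fr.1 fr.2.1 a b (le_refl _) (by omega) (by omega)

-- unfolding A's top call one level, expressed over B's collected child frames
lemma LF_unfold (m f : Int) (p : List Int) :
    list_factorizations m f p
      = (p ++ [m]) :: (collectB ((m + 1 - f).toNat) m f p []).flatMap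
          (fun fr => list_factorizations fr.1 fr.2.1 fr.2.2) := by
  unfold list_factorizations
  simp only [goA]
  rw [factLoopA_eq]
  simp only [List.cons_append, List.nil_append]
  congr 1
  refine List.flatMap_congr (fun fr hfr => ?_)
  have hlt := collectB_mem_lt hfr
  exact goA_irrel m.toNat fr.1 fr.2.1 fr.2.2 m.toNat (fr.1.toNat + 1) (by omega) (by omega) (by omega)

lemma sizeT_unfold (m f : Int) (p : List Int) :
    sizeT (m.toNat + 1) m f
      = 1 + ((collectB ((m + 1 - f).toNat) m f p []).map
          (fun fr => sizeT (fr.1.toNat + 1) fr.1 fr.2.1)).sum := by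
  simp only [sizeT]
  rw [sizeL_eq _ _ _ _ p]
  congr 1
  refine congrArg List.sum (List.map_congr_left (fun fr hfr => ?_))
  have hlt := collectB_mem_lt hfr
  exact sizeT_irrel m.toNat fr.1 fr.2.1 m.toNat (fr.1.toNat + 1) (by omega) (by omega) (by omega)

lemma sizeT_pos (k : Nat) (m f : Int) : 1 ≤ sizeT k m f := by
  cases k with
  | zero => simp [sizeT]
  | succ j =>
    rw [sizeT, sizeL_eq _ _ _ _ []]
    omega

-- the worklist loop, given enough fuel, is A's result concatenated over the stack
lemma runB_correct : ∀ (fuel : Nat) (stack : List (Int × Int × List Int)) (acc : List (List Int)),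
    (stack.map (fun fr => sizeT (fr.1.toNat + 1) fr.1 fr.2.1)).sum ≤ fuel →
    runB fuel stack acc
      = acc.reverse ++ stack.flatMap (fun fr => list_factorizations fr.1 fr.2.1 fr.2.2) := by
  intro fuel
  induction fuel with
  | zero =>
    intro stack acc h
    match stack with
    | [] => simp [runB]
    | (m, f, p) :: rest =>
      exfalso
      simp only [List.map_cons, List.sum_cons] at h
      have := sizeT_pos (m.toNat + 1) m f
      omega
  | succ k ih =>
    intro stack acc h
    match stack with
    | [] => simp [runB]
    | (m, f, p) :: rest =>
      rw [runB]
      have hsz := sizeT_unfold m f p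
      simp only [List.map_cons, List.sum_cons] at h
      rw [ih (collectB ((m + 1 - f).toNat) m f p [] ++ rest) ((p ++ [m]) :: acc)
          (by simp only [List.map_append, List.sum_append]; omega)]
      rw [List.flatMap_cons, LF_unfold, List.flatMap_append]
      simp

-- ===== VERDICT (by name: the statement is the Claim_ definition above) =====
theorem list_factorizations_spec : Claim_equal_list_factorizations := by
  intro n min_f prefix_ _ _
  unfold Spec_list_factorizations list_factorizations_alt
  rw [runB_correct _ _ _ (by simp only [List.map_cons, List.sum_cons, List.map_nil, List.sum_nil]; omega)]
  simp
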